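-- pv_equiv track=rewrite | github.com/S0jer/advent-of-code-2021 | Day10_SyntaxScoring.py | count_cost
-- ===== SOURCE A (Python) =====
-- def count_cost(A):
--     result = 0
--     for i in range(len(A) - 1, -1, -1):
--         result *= 5
--         if A[i] == '(':
--             result += 1
--         elif A[i] == '[':
--             result += 2
--         elif A[i] == '{':
--             result += 3
--         elif A[i] == '<':
--             result += 4
--
--     return result
-- ===== SOURCE B (Python) =====
-- _DIGITS = {'(': 1, '[': 2, '{': 3, '<': 4}
--
-- def count_cost(A):
--     total = 0
--     weight = 1
--     for c in A:
--         total += _DIGITS.get(c, 0) * weight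
--         weight *= 5
--     return total
-- ===== Notes on version B (the rewrite author's own statement) =====
-- stated objective: alternative
-- what changed: Replaces the backward index loop with a Horner accumulator (result = result*5 + digit, scanning indices from the end via range(len-1,-1,-1) and an if/elif chain) with a single forward pass over the elements that sums digit(c)*weight from a dict lookup while maintaining a running positional weight (powers of 5).
import Mathlib
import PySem

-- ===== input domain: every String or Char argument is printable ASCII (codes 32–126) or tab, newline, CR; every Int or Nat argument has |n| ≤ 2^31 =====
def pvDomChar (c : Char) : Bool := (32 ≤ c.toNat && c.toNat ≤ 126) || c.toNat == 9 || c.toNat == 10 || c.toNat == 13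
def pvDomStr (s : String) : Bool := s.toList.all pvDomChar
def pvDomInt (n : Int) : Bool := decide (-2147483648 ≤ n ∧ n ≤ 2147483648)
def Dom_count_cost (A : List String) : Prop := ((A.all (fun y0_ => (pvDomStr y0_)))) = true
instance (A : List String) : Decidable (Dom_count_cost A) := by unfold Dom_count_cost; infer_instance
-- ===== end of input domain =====

-- B replaces A's backward-index Horner accumulator with a forward pass keeping a running positional weight (alternative decomposition).

-- ===== PORT A =====
-- literal port: for i in range(len(A)-1, -1, -1): result *= 5; if/elif digit chain on A[i]
def count_cost (A : List String) : Int :=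
  (PySem.List.pyRange ((A.length : Int) - 1) (-1) (-1)).foldl
    (fun result i =>
      let result := result * 5
      if PySem.List.pyGetD A i "" = "(" then result + 1
      else if PySem.List.pyGetD A i "" = "[" then result + 2
      else if PySem.List.pyGetD A i "" = "{" then result + 3
      else if PySem.List.pyGetD A i "" = "<" then result + 4
      else result)
    0

-- ===== PORT B =====
def pvDigits : PySem.Dict String Int :=
  ((((PySem.Dict.empty).insert "(" 1).insert "[" 2).insert "{" 3).insert "<" 4

-- forward pass: state (total, weight); total += digits.get(c,0) * weight; weight *= 5
def count_cost_alt (A : List String) : Int :=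
  (A.foldl (fun st c => (st.1 + pvDigits.getD c 0 * st.2, st.2 * 5)) ((0 : Int), (1 : Int))).1

-- ===== PRECONDITION & SPEC =====
def Spec_count_cost (A : List String) (out : Int) : Prop := out = count_cost_alt A
instance (A : List String) (out : Int) : Decidable (Spec_count_cost A out) := by unfold Spec_count_cost; infer_instance

-- ===== CLAIM (what is proved, stated in full; the proofs are below) =====
def Claim_equal_count_cost : Prop := ∀ (A : List String), Dom_count_cost A → Spec_count_cost A (count_cost A)

-- ===== LEMMAS AND PROOFS =====

theorem pvFoldlMap {α β γ : Type} (g : α → β) (f : γ → β → γ) (l : List α) (init : γ) :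
    l.foldl (fun x y => f x (g y)) init = (l.map g).foldl f init :=
  by rw [List.foldl_map]

-- the per-element digit value, common denominator of both ports
def pvDigit (s : String) : Int :=
  if s = "(" then 1 else if s = "[" then 2 else if s = "{" then 3 else if s = "<" then 4 else 0

theorem pvDigits_getD (s : String) : pvDigits.getD s 0 = pvDigit s := by
  have h : pvDigits = PySem.Dict.mk [("(", 1), ("[", 2), ("{", 3), ("<", 4)] := by rfl
  rw [h]
  simp only [PySem.Dict.getD, PySem.Dict.get?_mk_cons, pvDigit]
  split_ifs <;> simp_all only [beq_iff_eq, Option.getD_some] <;> subst_vars <;>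
    first | rfl | simp_all

theorem count_cost_eq_horner_reverse (A : List String) :
    count_cost A = A.reverse.foldl (fun r s => r * 5 + pvDigit s) 0 := by
  unfold count_cost
  rw [PySem.List.pyRange_neg_one_eq_reverse]
  rw [show ((-1 : Int) + 1) = 0 by ring, show ((A.length : Int) - 1 + 1) = (A.length : Int) by ring]
  have hfun : (fun (result : Int) (i : Int) =>
      let result := result * 5
      if PySem.List.pyGetD A i "" = "(" then result + 1
      else if PySem.List.pyGetD A i "" = "[" then result + 2
      else if PySem.List.pyGetD A i "" = "{" then result + 3
      else if PySem.List.pyGetD A i "" = "<" then result + 4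
      else result)
      = fun r i => r * 5 + pvDigit (PySem.List.pyGetD A i "") := by
    funext r i
    simp only [pvDigit]
    split_ifs <;> ring
  rw [hfun, pvFoldlMap (fun i => PySem.List.pyGetD A i "") (fun r s => r * 5 + pvDigit s),
    List.map_reverse, PySem.List.map_pyGetD_pyRange_zero' (xs := A) (d := "")]

theorem foldl_alt_eq (A : List String) (t p : Int) :
    (A.foldl (fun st c => (st.1 + pvDigit c * st.2, st.2 * 5)) (t, p)).1
      = t + p * (A.reverse.foldl (fun r s => r * 5 + pvDigit s) 0) := by
  induction A generalizing t p with
  | nil => simp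
  | cons a A ih =>
      simp only [List.foldl_cons, List.reverse_cons, List.foldl_append, List.foldl_nil, ih]
      ring

-- ===== VERDICT =====
theorem count_cost_spec : Claim_equal_count_cost := by
  intro A _
  unfold Spec_count_cost count_cost_alt
  simp only [pvDigits_getD]
  rw [count_cost_eq_horner_reverse, foldl_alt_eq]
  ring
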